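-- pv_equiv track=rewrite | github.com/AlgoConnectSASTRA/Editorial-August-Monthly--2024 | The Rising Stones/The Rising Stones.py | solution
-- ===== SOURCE A (Python) =====
-- def solution(n, heights):
--     '''
--     Approach:
--         1. Initialize `maximum` with the height of the first step to keep track of the highest step seen so far.
--         2. Initialize `result` to 0, which will accumulate the total amount of "increased height" needed.
--         3. Iterate through the heights list:
--             - Update `maximum` to be the maximum of the current `maximum` and the current step height.
--             - If the current step height is less than the `maximum`, add the difference (`maximum - heights[i]`) to `result`.
--         4. Return the `result`, which represents the total height increases needed to make the heights non-decreasing.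
--     '''
--
--     maximum = heights[0]
--     result = 0
--
--     for i in range(n):
--         maximum = max(maximum, heights[i])
--         if heights[i] < maximum:
--             result += (maximum - heights[i])
--
--     return result
-- ===== SOURCE B (Python) =====
-- def solution(n, heights):
--     # Stateless closed form: for each step, recompute the prefix maximum from
--     # scratch and sum the deficits; no running maximum or accumulator is kept.
--     return sum(max(heights[:i + 1]) - heights[i] for i in range(n))
-- ===== Notes on version B (the rewrite author's own statement) =====
-- stated objective: simpler
-- what changed: Replaces A's stateful single pass (a running maximum and a result accumulator updated together in one loop) with a stateless one-line sum of closed-form per-index terms, recomputing each prefix maximum max(heights[:i+1]) from scratch.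
import Mathlib
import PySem

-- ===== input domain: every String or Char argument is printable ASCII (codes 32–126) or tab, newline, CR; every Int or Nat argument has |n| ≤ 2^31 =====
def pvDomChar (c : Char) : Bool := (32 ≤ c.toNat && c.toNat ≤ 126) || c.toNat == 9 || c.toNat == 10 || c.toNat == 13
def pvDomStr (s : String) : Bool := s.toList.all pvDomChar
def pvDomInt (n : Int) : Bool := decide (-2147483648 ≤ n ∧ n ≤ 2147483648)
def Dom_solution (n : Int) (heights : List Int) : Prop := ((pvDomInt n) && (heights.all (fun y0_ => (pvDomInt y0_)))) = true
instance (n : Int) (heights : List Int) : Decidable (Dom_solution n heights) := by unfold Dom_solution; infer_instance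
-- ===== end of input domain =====

-- B replaces A's stateful single pass (running maximum + accumulator) by a stateless
-- sum of closed-form per-index terms, recomputing each prefix maximum from scratch; no speed claim.


-- ===== PORT A =====
-- A's loop body over the indices of range(n); heights[i] is pyGetD (always in range under Pre_).
def solutionStep (heights : List Int) (p : Int × Int) (i : Int) : Int × Int :=
  let hi := PySem.List.pyGetD heights i 0
  let m := max p.1 hi
  (m, if hi < m then p.2 + (m - hi) else p.2)

def solution (n : Int) (heights : List Int) : Int :=
  -- maximum starts as heights[0]; Pre_ excludes empty heights (IndexError)
  ((PySem.List.pyRange 0 n 1).foldl (solutionStep heights) (PySem.List.pyGetD heights 0 0, 0)).2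

-- ===== PORT B =====
-- B: sum(max(heights[:i+1]) - heights[i] for i in range(n)); max of a list is PySem.List.max?
-- (nonempty under Pre_, so .getD 0 is never the default).
def solution_alt (n : Int) (heights : List Int) : Int :=
  ((PySem.List.pyRange 0 n 1).map (fun i =>
      (PySem.List.max? (PySem.List.slice heights none (some (i + 1))) (fun y => y)).getD 0
        - PySem.List.pyGetD heights i 0)).sum

-- ===== PRECONDITION & SPEC =====
-- Pre_ is exactly the set of inputs on which A returns: heights nonempty (unconditional heights[0])
-- and n ≤ len(heights) (otherwise heights[i] raises IndexError inside the loop).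
def Pre_solution (n : Int) (heights : List Int) : Prop :=
  heights ≠ [] ∧ n ≤ (heights.length : Int)
instance (n : Int) (heights : List Int) : Decidable (Pre_solution n heights) := by
  unfold Pre_solution; infer_instance

def pvWitness_solution : Int × List Int := (4, [3, 1, 4, 2])

def Spec_solution (n : Int) (heights : List Int) (out : Int) : Prop := out = solution_alt n heights
instance (n : Int) (heights : List Int) (out : Int) : Decidable (Spec_solution n heights out) := by unfold Spec_solution; infer_instance

-- ===== CLAIM (what is proved, stated in full; the proofs are below) =====
def Claim_equal_solution : Prop := ∀ (n : Int) (heights : List Int), Dom_solution n heights → Pre_solution n heights → Spec_solution n heights (solution n heights)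

-- ===== LEMMAS AND PROOFS =====

-- running-maximum sum: gsum m l = sum of the running maxima of l seeded with m
def gsum (m : Int) : List Int → Int
  | [] => 0
  | h :: t => max m h + gsum (max m h) t

-- A's loop, fully characterised: result accumulator = r + (sum of running maxima) - (sum of elements)
theorem solutionStep_fold (xs : List Int) (m r : Int) :
    (xs.foldl (fun (p : Int × Int) h =>
        (max p.1 h, if h < max p.1 h then p.2 + (max p.1 h - h) else p.2)) (m, r)).2
      = r + gsum m xs - xs.sum := by
  induction xs generalizing m r with
  | nil => simp [gsum]
  | cons h t ih =>
    simp only [List.foldl_cons, List.sum_cons, gsum]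
    rw [ih]
    rcases le_or_gt m h with hc | hc
    · rw [max_eq_right hc]; simp; ring
    · rw [max_eq_left hc.le, if_pos hc]; ring

-- Int sums split over pointwise subtraction (used to separate B's two sums)
theorem sum_map_sub_int {α : Type} (xs : List α) (f g : α → Int) :
    (xs.map (fun x => f x - g x)).sum = (xs.map f).sum - (xs.map g).sum := by
  induction xs with
  | nil => simp
  | cons h t ih => simp [ih]; ring

-- B's prefix-maximum terms, summed: Σ_{k < |t|} max-of (t.take (k+1)) seeded with m = gsum m t
theorem sum_prefix_max (t : List Int) (m : Int) :
    ((List.range t.length).map (fun k => (t.take (k + 1)).foldl max m)).sum = gsum m t := by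
  induction t generalizing m with
  | nil => simp [gsum]
  | cons h t ih =>
    simp only [List.length_cons, List.range_succ_eq_map, List.map_cons, List.map_map,
      List.sum_cons, List.take_succ_cons, List.foldl_cons, gsum]
    rw [← ih (max m h)]
    simp [Function.comp_def]

-- ===== VERDICT (by name: the statement is the Claim_ definition above) =====
theorem solution_spec : Claim_equal_solution := by
  intro n heights _ hpre
  obtain ⟨hne, hlenn⟩ := hpre
  unfold Spec_solution solution solution_alt
  rcases le_or_gt n 0 with hn | hn
  · -- n ≤ 0 : empty range on both sides
    rw [PySem.List.pyRange_one_eq_nil hn]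
    simp
  · obtain ⟨h0, rest, rfl⟩ : ∃ h0 rest, heights = h0 :: rest := by
      cases heights with
      | nil => exact absurd rfl hne
      | cons a t => exact ⟨a, t, rfl⟩
    have hklen : n.toNat ≤ (h0 :: rest).length := by
      simp only [List.length_cons] at hlenn ⊢; omega
    set l := (h0 :: rest).take n.toNat with hldef
    have hlen_l : l.length = n.toNat := by
      rw [hldef, List.length_take]; omega
    -- ===== A's side: rewrite the range fold as a fold over the prefix l =====
    have hrange : PySem.List.pyRange 0 n 1 = PySem.List.pyRange 0 (l.length : Int) 1 := by
      rw [hlen_l]; congr 1; omega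
    have hget_ll : ∀ x : Int, 0 ≤ x → x < (l.length : Int) →
        PySem.List.pyGetD (h0 :: rest) x 0 = PySem.List.pyGetD l x 0 := by
      intro x hx1 hx2
      rw [PySem.List.pyGetD_eq_getElem (h0 :: rest) 0 hx1 (by omega),
          PySem.List.pyGetD_eq_getElem l 0 hx1 (by omega)]
      exact (List.getElem_take).symm
    have hcong : (PySem.List.pyRange 0 (l.length : Int) 1).foldl (solutionStep (h0 :: rest))
          (PySem.List.pyGetD (h0 :: rest) 0 0, 0)
        = (PySem.List.pyRange 0 (l.length : Int) 1).foldl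
            (fun (p : Int × Int) j =>
              (fun (q : Int × Int) (h : Int) =>
                (max q.1 h, if h < max q.1 h then q.2 + (max q.1 h - h) else q.2)) p
                (PySem.List.pyGetD l j 0))
            (PySem.List.pyGetD (h0 :: rest) 0 0, 0) := by
      apply PySem.List.foldl_congr_mem
      intro acc x hx
      rw [PySem.List.mem_pyRange_one] at hx
      simp [solutionStep, hget_ll x hx.1 hx.2]
    obtain ⟨m, hm⟩ : ∃ m, n.toNat = m + 1 := ⟨n.toNat - 1, by omega⟩
    have hl : l = h0 :: rest.take m := by rw [hldef, hm, List.take_succ_cons]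
    -- A's value
    have hA : ((PySem.List.pyRange 0 n 1).foldl (solutionStep (h0 :: rest))
          (PySem.List.pyGetD (h0 :: rest) 0 0, 0)).2 = 0 + gsum h0 l - l.sum := by
      rw [hrange, hcong,
          PySem.List.foldl_pyRange_zero_pyGetD' l 0
            (fun (q : Int × Int) (h : Int) =>
              (max q.1 h, if h < max q.1 h then q.2 + (max q.1 h - h) else q.2))
            (PySem.List.pyGetD (h0 :: rest) 0 0, 0),
          PySem.List.pyGetD_zero_cons, solutionStep_fold]
    -- ===== B's side: per-index closed form, rewritten over the prefix l =====
    have hBcong : (PySem.List.pyRange 0 n 1).map (fun i =>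
          (PySem.List.max? (PySem.List.slice (h0 :: rest) none (some (i + 1))) (fun y => y)).getD 0
            - PySem.List.pyGetD (h0 :: rest) i 0)
        = (PySem.List.pyRange 0 n 1).map (fun i =>
          (PySem.List.max? (l.take (i.toNat + 1)) (fun y => y)).getD 0
            - PySem.List.pyGetD l i 0) := by
      apply List.map_congr_left
      intro x hx
      rw [PySem.List.mem_pyRange_one] at hx
      have h1 : PySem.List.slice (h0 :: rest) none (some (x + 1)) = l.take (x.toNat + 1) := by
        rw [PySem.List.slice_to (h0 :: rest) (by omega), hldef, List.take_take]
        congr 1; omega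
      rw [h1, hget_ll x hx.1 (by omega)]
    -- second sum: Σ heights[i] over range(n) is l.sum
    have hlen_cast : n = PySem.List.len l := by
      simp [PySem.List.len, hlen_l]; omega
    have hsum2 : ((PySem.List.pyRange 0 n 1).map (fun i => PySem.List.pyGetD l i 0)).sum
        = l.sum := by
      rw [hlen_cast, PySem.List.map_pyGetD_pyRange_zero]
    -- first sum: Σ max(l[:i+1]) over range(n) is gsum h0 l
    have hsum1 : ((PySem.List.pyRange 0 n 1).map (fun i =>
          (PySem.List.max? (l.take (i.toNat + 1)) (fun y => y)).getD 0)).sum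
        = gsum h0 l := by
      rw [PySem.List.pyRange_one, List.map_map]
      have hcast : (n - 0).toNat = m + 1 := by omega
      rw [hcast]
      have hterm : ∀ k : Nat, ((fun i : Int =>
            (PySem.List.max? (l.take (i.toNat + 1)) (fun y => y)).getD 0) ∘ fun k : Nat => 0 + (k : Int)) k
          = ((rest.take m).take k).foldl max h0 := by
        intro k
        simp only [Function.comp, hl]
        have : ((0 : Int) + (k : Int)).toNat = k := by omega
        rw [this, List.take_succ_cons, PySem.List.max?_id_cons]
        rfl
      rw [List.map_congr_left (fun k _ => hterm k)]
      rw [List.range_succ_eq_map, List.map_cons, List.map_map, List.sum_cons]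
      have hlen_t : (rest.take m).length = m := by
        rw [List.length_take]; simp only [List.length_cons] at hlenn; omega
      have hmap2 : (List.range m).map ((fun k => ((rest.take m).take k).foldl max h0) ∘ Nat.succ)
          = (List.range (rest.take m).length).map (fun k => ((rest.take m).take (k + 1)).foldl max h0) := by
        rw [hlen_t]; rfl
      rw [hmap2, sum_prefix_max]
      simp [hl, gsum]
    have hB : ((PySem.List.pyRange 0 n 1).map (fun i =>
          (PySem.List.max? (PySem.List.slice (h0 :: rest) none (some (i + 1))) (fun y => y)).getD 0
            - PySem.List.pyGetD (h0 :: rest) i 0)).sum = gsum h0 l - l.sum := by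
      rw [hBcong, sum_map_sub_int, hsum1, hsum2]
    rw [hA, hB]
    ring
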